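-- pv_equiv track=rewrite | github.com/BugTraceAI/BugTraceAI-CLI | bugtrace/tools/waf/encodings.py | _newline_injection
-- ===== SOURCE A (Python) =====
-- def _newline_injection(payload: str) -> str:
--     """
--     Insert newlines to break regex patterns.
--     <script> -> <scr\nipt>
--     """
--     replacements = [
--         ("script", "scr\nipt"),
--         ("SELECT", "SEL\nECT"),
--         ("UNION", "UNI\nON"),
--         ("alert", "ale\nrt"),
--     ]
--     result = payload
--     for original, replacement in replacements:
--         result = result.replace(original, replacement)
--         result = result.replace(original.lower(), replacement.lower())
--     return result
-- ===== SOURCE B (Python) =====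
-- def _newline_injection(payload: str) -> str:
--     """Single left-to-right scan: at each position try the six exact-case
--     keywords; on a match emit its newline-broken form and skip it, else copy
--     the character. One pass instead of eight full-string replace scans."""
--     table = [
--         ("script", "scr\nipt"),
--         ("SELECT", "SEL\nECT"),
--         ("select", "sel\nect"),
--         ("UNION", "UNI\nON"),
--         ("union", "uni\non"),
--         ("alert", "ale\nrt"),
--     ]
--     out = []
--     i = 0
--     n = len(payload)
--     while i < n:
--         for kw, broken in table:
--             if payload.startswith(kw, i):
--                 out.append(broken)
--                 i += len(kw)
--                 break
--         else:
--             out.append(payload[i])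
--             i += 1
--     return "".join(out)
-- ===== Notes on version B (the rewrite author's own statement) =====
-- stated objective: alternative
-- what changed: Replaces A's eight sequential full-string str.replace passes by a single left-to-right scan that at each position matches one of the six exact-case keywords and emits its newline-broken form; the non-overlapping keywords and newline-free tails make the single pass equal to the replace chain.
import Mathlib
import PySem

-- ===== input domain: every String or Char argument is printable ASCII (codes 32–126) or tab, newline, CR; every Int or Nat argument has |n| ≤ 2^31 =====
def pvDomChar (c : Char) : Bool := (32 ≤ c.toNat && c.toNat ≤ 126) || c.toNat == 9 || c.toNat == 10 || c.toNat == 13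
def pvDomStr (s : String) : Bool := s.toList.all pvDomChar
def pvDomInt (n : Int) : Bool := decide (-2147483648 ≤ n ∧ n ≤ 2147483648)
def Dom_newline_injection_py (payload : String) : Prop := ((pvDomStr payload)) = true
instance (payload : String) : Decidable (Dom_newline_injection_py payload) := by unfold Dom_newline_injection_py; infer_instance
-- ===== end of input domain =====

-- B replaces A's eight sequential full-string str.replace passes by ONE left-to-right scan
-- matching the six exact-case keywords in place; same return value, different traversal.

-- ===== PORT A =====
-- literal port of A: fold over the four (original, replacement) pairs, each time
-- replacing the original and then its lowercase form (str.replace = PySem.Str.replace)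
def newline_injection_py (payload : String) : String :=
  let replacements : List (String × String) :=
    [("script", "scr\nipt"), ("SELECT", "SEL\nECT"), ("UNION", "UNI\nON"), ("alert", "ale\nrt")]
  replacements.foldl
    (fun result p =>
      let r1 := PySem.Str.replace result p.1 p.2
      PySem.Str.replace r1 (PySem.Str.lower p.1) (PySem.Str.lower p.2))
    payload

-- ===== PORT B =====
-- the table of Source B, as character lists ("script" = ['s','c','r','i','p','t'], …)
def pvTable : List (List Char × List Char) :=
  [ (['s','c','r','i','p','t'], ['s','c','r','\n','i','p','t'])
  , (['S','E','L','E','C','T'], ['S','E','L','\n','E','C','T'])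
  , (['s','e','l','e','c','t'], ['s','e','l','\n','e','c','t'])
  , (['U','N','I','O','N'],     ['U','N','I','\n','O','N'])
  , (['u','n','i','o','n'],     ['u','n','i','\n','o','n'])
  , (['a','l','e','r','t'],     ['a','l','e','\n','r','t']) ]

-- Source B's while-loop: at position i try each keyword (payload.startswith(kw, i));
-- on a match emit the broken form and advance by len(kw), else copy the character.
def pvScan : List Char → List Char
  | [] => []
  | c :: t =>
    match pvTable.find? (fun p => PySem.Chars.startswith (c :: t) p.1) with
    | some (kw, _broken) => _broken ++ pvScan (t.drop (kw.length - 1))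
    | none => c :: pvScan t
termination_by l => l.length
decreasing_by
  all_goals simp [List.length_drop]

def newline_injection_py_alt (payload : String) : String :=
  String.ofList (pvScan payload.toList)

-- ===== PRECONDITION & SPEC =====
def Spec_newline_injection_py (payload : String) (out : String) : Prop := out = newline_injection_py_alt payload
instance (payload : String) (out : String) : Decidable (Spec_newline_injection_py payload out) := by unfold Spec_newline_injection_py; infer_instance

-- ===== CLAIM (what is proved, stated in full; the proofs are below) =====
def Claim_equal_newline_injection_py : Prop := ∀ (payload : String), Dom_newline_injection_py payload → Spec_newline_injection_py payload (newline_injection_py payload)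

-- ===== LEMMAS AND PROOFS =====

-- clean recursive form of one CPython str.replace pass (leftmost, non-overlapping)
def pvRep (o n : List Char) : List Char → List Char
  | [] => []
  | c :: t =>
    if o.isPrefixOf (c :: t) then n ++ pvRep o n (t.drop (o.length - 1))
    else c :: pvRep o n t
termination_by l => l.length
decreasing_by
  all_goals simp [List.length_drop]

lemma pvRep_go_spec (o n : List Char) (ho : o ≠ []) :
    ∀ (fuel : Nat) (l acc : List Char), l.length ≤ fuel →
      PySem.Chars.replace.go o n fuel l acc = acc.reverse ++ pvRep o n l := by
  intro fuel
  induction fuel with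
  | zero =>
    intro l acc hl
    have : l = [] := List.length_eq_zero_iff.mp (Nat.le_zero.mp hl)
    subst this
    simp [PySem.Chars.replace.go, pvRep]
  | succ N ih =>
    intro l acc hl
    cases l with
    | nil => simp [PySem.Chars.replace.go, pvRep]
    | cons c t =>
      obtain ⟨oc, o', rfl⟩ : ∃ a l', o = a :: l' := by
        cases o with
        | nil => exact absurd rfl ho
        | cons a l' => exact ⟨a, l', rfl⟩
      have ht : t.length ≤ N := by simpa using hl
      simp only [PySem.Chars.replace.go]
      by_cases hp : (oc :: o').isPrefixOf (c :: t) = true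
      · rw [if_pos hp]
        have hlen : (List.drop ((oc :: o').length) (c :: t)).length ≤ N := by
          simp [List.length_drop]; omega
        rw [ih _ _ hlen]
        simp only [pvRep]
        rw [if_pos hp]
        simp [List.drop_succ_cons]
      · rw [if_neg hp, ih _ _ ht]
        simp only [pvRep]
        rw [if_neg hp]
        simp

lemma pvReplace_eq_pvRep (s o n : List Char) (ho : o ≠ []) :
    PySem.Chars.replace s o n = pvRep o n s := by
  rw [PySem.Chars.replace, if_neg (by simpa [List.isEmpty_iff] using ho)]
  simpa using pvRep_go_spec o n ho s.length s [] le_rfl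

lemma pvPrefix_append_cases {o s x : List Char} (h : o <+: s ++ x) : o <+: s ∨ s <+: o := by
  rcases Nat.lt_or_ge s.length o.length with hlt | hge
  · exact Or.inr (List.prefix_of_prefix_length_le (s.prefix_append x) h hlt.le)
  · exact Or.inl (List.prefix_of_prefix_length_le h (s.prefix_append x) hge)

-- o never matches starting inside b (at any offset, including 0), whatever follows b
def pvFree (o b : List Char) : Bool :=
  (List.range b.length).all (fun j => !(decide (o <+: b.drop j) || decide (b.drop j <+: o)))

lemma pvRep_append_of_free {o b : List Char} (n : List Char) (hf : pvFree o b = true) (x : List Char) :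
    pvRep o n (b ++ x) = b ++ pvRep o n x := by
  induction b with
  | nil => simp
  | cons d b' ih =>
    have hall := (List.all_eq_true.mp hf)
    have h0 : ¬ o <+: (d :: b') ∧ ¬ (d :: b') <+: o := by
      have := hall 0 (by simp [List.mem_range])
      simpa using this
    have hnp : ¬ (o.isPrefixOf (d :: (b' ++ x)) = true) := by
      rw [List.isPrefixOf_iff_prefix]
      intro hc
      rw [← List.cons_append] at hc
      rcases pvPrefix_append_cases hc with h | h
      · exact h0.1 h
      · exact h0.2 h
    have hf' : pvFree o b' = true := by
      refine List.all_eq_true.mpr ?_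
      intro j hj
      have hj' : j < b'.length := List.mem_range.mp hj
      have := hall (j + 1) (List.mem_range.mpr (by simpa using Nat.succ_lt_succ hj'))
      simpa [List.drop_succ_cons] using this
    rw [List.cons_append]
    simp only [pvRep]
    rw [if_neg hnp, ih hf']
    simp

lemma pvRep_self_prefix {o : List Char} (n : List Char) (ho : o ≠ []) (y : List Char) :
    pvRep o n (o ++ y) = n ++ pvRep o n y := by
  obtain ⟨oc, o', rfl⟩ : ∃ a l', o = a :: l' := by
    cases o with
    | nil => exact absurd rfl ho
    | cons a l' => exact ⟨a, l', rfl⟩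
  rw [List.cons_append]
  simp only [pvRep]
  rw [if_pos (by rw [List.isPrefixOf_iff_prefix]; simp)]
  simp

lemma pvRep_cons_of_not_prefix {o : List Char} (n : List Char) {c : Char} {t : List Char}
    (h : ¬ o <+: c :: t) : pvRep o n (c :: t) = c :: pvRep o n t := by
  simp only [pvRep]
  rw [if_neg (by simpa [List.isPrefixOf_iff_prefix] using h)]

-- a word w whose characters avoid both first characters passes unchanged through pvRep:
-- w is a prefix of the output iff it is a prefix of the input
lemma pvRep_prefix_iff {o n w : List Char} {oc nc : Char}
    (ho : o.head? = some oc) (hn : n.head? = some nc)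
    (hw : ∀ ch ∈ w, ch ≠ oc ∧ ch ≠ nc) :
    ∀ t, (w <+: pvRep o n t ↔ w <+: t) := by
  obtain ⟨o', rfl⟩ : ∃ l', o = oc :: l' := by
    cases o with
    | nil => simp at ho
    | cons a l' =>
      simp only [List.head?_cons, Option.some.injEq] at ho
      subst ho; exact ⟨l', rfl⟩
  obtain ⟨n', rfl⟩ : ∃ l', n = nc :: l' := by
    cases n with
    | nil => simp at hn
    | cons a l' =>
      simp only [List.head?_cons, Option.some.injEq] at hn
      subst hn; exact ⟨l', rfl⟩
  intro t
  induction t generalizing w with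
  | nil => simp [pvRep]
  | cons c t' ih =>
    by_cases hp : (oc :: o') <+: (c :: t')
    · simp only [pvRep]
      rw [if_pos (List.isPrefixOf_iff_prefix.mpr hp)]
      cases w with
      | nil => simp
      | cons d w' =>
        have hd := hw d (by simp)
        have hoc : oc = c := (List.cons_prefix_cons.mp hp).1
        constructor
        · intro hc
          rw [List.cons_append, List.cons_prefix_cons] at hc
          exact absurd hc.1 hd.2
        · intro hc
          rw [List.cons_prefix_cons] at hc
          exact absurd (hc.1.trans hoc.symm) hd.1
    · rw [pvRep_cons_of_not_prefix _ hp]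
      cases w with
      | nil => simp
      | cons d w' =>
        rw [List.cons_prefix_cons, List.cons_prefix_cons,
          ih (fun ch hch => hw ch (by simp [hch]))]

-- the six keywords of the table
def pvKeywords : List (List Char) :=
  [ ['s','c','r','i','p','t'], ['S','E','L','E','C','T'], ['s','e','l','e','c','t']
  , ['U','N','I','O','N'], ['u','n','i','o','n'], ['a','l','e','r','t'] ]

-- no keyword starts the list
def pvKwFree (l : List Char) : Prop := ∀ k ∈ pvKeywords, ¬ k <+: l

-- one replace pass over a keyword-free head keeps the head character and keyword-freedom
set_option maxRecDepth 8192 in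
lemma pvStep_free' {p : List Char × List Char} (hmem : p ∈ pvTable) {c : Char} {t : List Char}
    (hfree : pvKwFree (c :: t)) :
    pvRep p.1 p.2 (c :: t) = c :: pvRep p.1 p.2 t ∧ pvKwFree (c :: pvRep p.1 p.2 t) := by
  fin_cases hmem <;>
    refine ⟨pvRep_cons_of_not_prefix _ (hfree _ (by decide)), ?_⟩ <;>
    · intro k hk hpre
      fin_cases hk <;>
        (rw [List.cons_prefix_cons] at hpre
         rw [pvRep_prefix_iff rfl rfl (by simp)] at hpre
         exact hfree _ (by decide) (List.cons_prefix_cons.mpr hpre))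

lemma pvStep_free {o n : List Char} (hmem : (o, n) ∈ pvTable) {c : Char} {t : List Char}
    (hfree : pvKwFree (c :: t)) :
    pvRep o n (c :: t) = c :: pvRep o n t ∧ pvKwFree (c :: pvRep o n t) :=
  pvStep_free' (p := (o, n)) hmem hfree

-- the eight replace passes of A, innermost first
def pvChain (l : List Char) : List Char :=
  pvRep ['a','l','e','r','t'] ['a','l','e','\n','r','t']
    (pvRep ['a','l','e','r','t'] ['a','l','e','\n','r','t']
      (pvRep ['u','n','i','o','n'] ['u','n','i','\n','o','n']
        (pvRep ['U','N','I','O','N'] ['U','N','I','\n','O','N']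
          (pvRep ['s','e','l','e','c','t'] ['s','e','l','\n','e','c','t']
            (pvRep ['S','E','L','E','C','T'] ['S','E','L','\n','E','C','T']
              (pvRep ['s','c','r','i','p','t'] ['s','c','r','\n','i','p','t']
                (pvRep ['s','c','r','i','p','t'] ['s','c','r','\n','i','p','t'] l)))))))

set_option maxRecDepth 16384 in
lemma pvChain_cons {c : Char} {t : List Char} (hfree : pvKwFree (c :: t)) :
    pvChain (c :: t) = c :: pvChain t := by
  obtain ⟨e1, f1⟩ := pvStep_free (show (['s','c','r','i','p','t'], ['s','c','r','\n','i','p','t']) ∈ pvTable by decide) hfree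
  obtain ⟨e2, f2⟩ := pvStep_free (show (['s','c','r','i','p','t'], ['s','c','r','\n','i','p','t']) ∈ pvTable by decide) f1
  obtain ⟨e3, f3⟩ := pvStep_free (show (['S','E','L','E','C','T'], ['S','E','L','\n','E','C','T']) ∈ pvTable by decide) f2
  obtain ⟨e4, f4⟩ := pvStep_free (show (['s','e','l','e','c','t'], ['s','e','l','\n','e','c','t']) ∈ pvTable by decide) f3
  obtain ⟨e5, f5⟩ := pvStep_free (show (['U','N','I','O','N'], ['U','N','I','\n','O','N']) ∈ pvTable by decide) f4
  obtain ⟨e6, f6⟩ := pvStep_free (show (['u','n','i','o','n'], ['u','n','i','\n','o','n']) ∈ pvTable by decide) f5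
  obtain ⟨e7, f7⟩ := pvStep_free (show (['a','l','e','r','t'], ['a','l','e','\n','r','t']) ∈ pvTable by decide) f6
  obtain ⟨e8, _⟩ := pvStep_free (show (['a','l','e','r','t'], ['a','l','e','\n','r','t']) ∈ pvTable by decide) f7
  simp only [pvChain]
  rw [e1, e2, e3, e4, e5, e6, e7, e8]

lemma pvStartswith_append_false {k b : List Char} (h1 : ¬ k <+: b) (h2 : ¬ b <+: k)
    (y : List Char) : PySem.Chars.startswith (b ++ y) k = false := by
  rw [Bool.eq_false_iff]
  intro hc
  rcases pvPrefix_append_cases (PySem.Chars.startswith_iff _ _ |>.mp hc) with h | h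
  · exact h1 h
  · exact h2 h

lemma pvStartswith_append_true (k y : List Char) :
    PySem.Chars.startswith (k ++ y) k = true :=
  PySem.Chars.startswith_iff _ _ |>.mpr (k.prefix_append y)

lemma pvChain_script (y : List Char) :
    pvChain (['s','c','r','i','p','t'] ++ y) = ['s','c','r','\n','i','p','t'] ++ pvChain y := by
  simp only [pvChain]
  rw [pvRep_self_prefix (o := ['s','c','r','i','p','t']) ['s','c','r','\n','i','p','t'] (by simp),
    pvRep_append_of_free (o := ['s','c','r','i','p','t']) (b := ['s','c','r','\n','i','p','t']) ['s','c','r','\n','i','p','t'] (by decide),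
    pvRep_append_of_free (o := ['S','E','L','E','C','T']) (b := ['s','c','r','\n','i','p','t']) ['S','E','L','\n','E','C','T'] (by decide),
    pvRep_append_of_free (o := ['s','e','l','e','c','t']) (b := ['s','c','r','\n','i','p','t']) ['s','e','l','\n','e','c','t'] (by decide),
    pvRep_append_of_free (o := ['U','N','I','O','N']) (b := ['s','c','r','\n','i','p','t']) ['U','N','I','\n','O','N'] (by decide),
    pvRep_append_of_free (o := ['u','n','i','o','n']) (b := ['s','c','r','\n','i','p','t']) ['u','n','i','\n','o','n'] (by decide),
    pvRep_append_of_free (o := ['a','l','e','r','t']) (b := ['s','c','r','\n','i','p','t']) ['a','l','e','\n','r','t'] (by decide),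
    pvRep_append_of_free (o := ['a','l','e','r','t']) (b := ['s','c','r','\n','i','p','t']) ['a','l','e','\n','r','t'] (by decide)]

lemma pvChain_SELECT (y : List Char) :
    pvChain (['S','E','L','E','C','T'] ++ y) = ['S','E','L','\n','E','C','T'] ++ pvChain y := by
  simp only [pvChain]
  rw [pvRep_append_of_free (o := ['s','c','r','i','p','t']) (b := ['S','E','L','E','C','T']) ['s','c','r','\n','i','p','t'] (by decide),
    pvRep_append_of_free (o := ['s','c','r','i','p','t']) (b := ['S','E','L','E','C','T']) ['s','c','r','\n','i','p','t'] (by decide),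
    pvRep_self_prefix (o := ['S','E','L','E','C','T']) ['S','E','L','\n','E','C','T'] (by simp),
    pvRep_append_of_free (o := ['s','e','l','e','c','t']) (b := ['S','E','L','\n','E','C','T']) ['s','e','l','\n','e','c','t'] (by decide),
    pvRep_append_of_free (o := ['U','N','I','O','N']) (b := ['S','E','L','\n','E','C','T']) ['U','N','I','\n','O','N'] (by decide),
    pvRep_append_of_free (o := ['u','n','i','o','n']) (b := ['S','E','L','\n','E','C','T']) ['u','n','i','\n','o','n'] (by decide),
    pvRep_append_of_free (o := ['a','l','e','r','t']) (b := ['S','E','L','\n','E','C','T']) ['a','l','e','\n','r','t'] (by decide),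
    pvRep_append_of_free (o := ['a','l','e','r','t']) (b := ['S','E','L','\n','E','C','T']) ['a','l','e','\n','r','t'] (by decide)]

lemma pvChain_select (y : List Char) :
    pvChain (['s','e','l','e','c','t'] ++ y) = ['s','e','l','\n','e','c','t'] ++ pvChain y := by
  simp only [pvChain]
  rw [pvRep_append_of_free (o := ['s','c','r','i','p','t']) (b := ['s','e','l','e','c','t']) ['s','c','r','\n','i','p','t'] (by decide),
    pvRep_append_of_free (o := ['s','c','r','i','p','t']) (b := ['s','e','l','e','c','t']) ['s','c','r','\n','i','p','t'] (by decide),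
    pvRep_append_of_free (o := ['S','E','L','E','C','T']) (b := ['s','e','l','e','c','t']) ['S','E','L','\n','E','C','T'] (by decide),
    pvRep_self_prefix (o := ['s','e','l','e','c','t']) ['s','e','l','\n','e','c','t'] (by simp),
    pvRep_append_of_free (o := ['U','N','I','O','N']) (b := ['s','e','l','\n','e','c','t']) ['U','N','I','\n','O','N'] (by decide),
    pvRep_append_of_free (o := ['u','n','i','o','n']) (b := ['s','e','l','\n','e','c','t']) ['u','n','i','\n','o','n'] (by decide),
    pvRep_append_of_free (o := ['a','l','e','r','t']) (b := ['s','e','l','\n','e','c','t']) ['a','l','e','\n','r','t'] (by decide),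
    pvRep_append_of_free (o := ['a','l','e','r','t']) (b := ['s','e','l','\n','e','c','t']) ['a','l','e','\n','r','t'] (by decide)]

lemma pvChain_UNION (y : List Char) :
    pvChain (['U','N','I','O','N'] ++ y) = ['U','N','I','\n','O','N'] ++ pvChain y := by
  simp only [pvChain]
  rw [pvRep_append_of_free (o := ['s','c','r','i','p','t']) (b := ['U','N','I','O','N']) ['s','c','r','\n','i','p','t'] (by decide),
    pvRep_append_of_free (o := ['s','c','r','i','p','t']) (b := ['U','N','I','O','N']) ['s','c','r','\n','i','p','t'] (by decide),
    pvRep_append_of_free (o := ['S','E','L','E','C','T']) (b := ['U','N','I','O','N']) ['S','E','L','\n','E','C','T'] (by decide),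
    pvRep_append_of_free (o := ['s','e','l','e','c','t']) (b := ['U','N','I','O','N']) ['s','e','l','\n','e','c','t'] (by decide),
    pvRep_self_prefix (o := ['U','N','I','O','N']) ['U','N','I','\n','O','N'] (by simp),
    pvRep_append_of_free (o := ['u','n','i','o','n']) (b := ['U','N','I','\n','O','N']) ['u','n','i','\n','o','n'] (by decide),
    pvRep_append_of_free (o := ['a','l','e','r','t']) (b := ['U','N','I','\n','O','N']) ['a','l','e','\n','r','t'] (by decide),
    pvRep_append_of_free (o := ['a','l','e','r','t']) (b := ['U','N','I','\n','O','N']) ['a','l','e','\n','r','t'] (by decide)]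

lemma pvChain_union (y : List Char) :
    pvChain (['u','n','i','o','n'] ++ y) = ['u','n','i','\n','o','n'] ++ pvChain y := by
  simp only [pvChain]
  rw [pvRep_append_of_free (o := ['s','c','r','i','p','t']) (b := ['u','n','i','o','n']) ['s','c','r','\n','i','p','t'] (by decide),
    pvRep_append_of_free (o := ['s','c','r','i','p','t']) (b := ['u','n','i','o','n']) ['s','c','r','\n','i','p','t'] (by decide),
    pvRep_append_of_free (o := ['S','E','L','E','C','T']) (b := ['u','n','i','o','n']) ['S','E','L','\n','E','C','T'] (by decide),
    pvRep_append_of_free (o := ['s','e','l','e','c','t']) (b := ['u','n','i','o','n']) ['s','e','l','\n','e','c','t'] (by decide),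
    pvRep_append_of_free (o := ['U','N','I','O','N']) (b := ['u','n','i','o','n']) ['U','N','I','\n','O','N'] (by decide),
    pvRep_self_prefix (o := ['u','n','i','o','n']) ['u','n','i','\n','o','n'] (by simp),
    pvRep_append_of_free (o := ['a','l','e','r','t']) (b := ['u','n','i','\n','o','n']) ['a','l','e','\n','r','t'] (by decide),
    pvRep_append_of_free (o := ['a','l','e','r','t']) (b := ['u','n','i','\n','o','n']) ['a','l','e','\n','r','t'] (by decide)]

lemma pvChain_alert (y : List Char) :
    pvChain (['a','l','e','r','t'] ++ y) = ['a','l','e','\n','r','t'] ++ pvChain y := by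
  simp only [pvChain]
  rw [pvRep_append_of_free (o := ['s','c','r','i','p','t']) (b := ['a','l','e','r','t']) ['s','c','r','\n','i','p','t'] (by decide),
    pvRep_append_of_free (o := ['s','c','r','i','p','t']) (b := ['a','l','e','r','t']) ['s','c','r','\n','i','p','t'] (by decide),
    pvRep_append_of_free (o := ['S','E','L','E','C','T']) (b := ['a','l','e','r','t']) ['S','E','L','\n','E','C','T'] (by decide),
    pvRep_append_of_free (o := ['s','e','l','e','c','t']) (b := ['a','l','e','r','t']) ['s','e','l','\n','e','c','t'] (by decide),
    pvRep_append_of_free (o := ['U','N','I','O','N']) (b := ['a','l','e','r','t']) ['U','N','I','\n','O','N'] (by decide),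
    pvRep_append_of_free (o := ['u','n','i','o','n']) (b := ['a','l','e','r','t']) ['u','n','i','\n','o','n'] (by decide),
    pvRep_self_prefix (o := ['a','l','e','r','t']) ['a','l','e','\n','r','t'] (by simp),
    pvRep_append_of_free (o := ['a','l','e','r','t']) (b := ['a','l','e','\n','r','t']) ['a','l','e','\n','r','t'] (by decide)]

lemma pvScan_script (y : List Char) :
    pvScan (['s','c','r','i','p','t'] ++ y) = ['s','c','r','\n','i','p','t'] ++ pvScan y := by
  have hT : ['s','c','r','i','p','t'] ++ y = 's' :: 'c' :: 'r' :: 'i' :: 'p' :: 't' :: y := by simp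
  rw [hT]
  have hs : PySem.Chars.startswith ('s' :: 'c' :: 'r' :: 'i' :: 'p' :: 't' :: y) ['s','c','r','i','p','t'] = true := by
    have := pvStartswith_append_true ['s','c','r','i','p','t'] y
    simpa using this
  simp only [pvScan, pvTable, List.find?, hs]
  simp [List.drop]

lemma pvScan_SELECT (y : List Char) :
    pvScan (['S','E','L','E','C','T'] ++ y) = ['S','E','L','\n','E','C','T'] ++ pvScan y := by
  have hT : ['S','E','L','E','C','T'] ++ y = 'S' :: 'E' :: 'L' :: 'E' :: 'C' :: 'T' :: y := by simp
  rw [hT]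
  have h0 : PySem.Chars.startswith ('S' :: 'E' :: 'L' :: 'E' :: 'C' :: 'T' :: y) ['s','c','r','i','p','t'] = false := by
    have := pvStartswith_append_false (k := ['s','c','r','i','p','t']) (b := ['S','E','L','E','C','T']) (by decide) (by decide) y
    simpa using this
  have hs : PySem.Chars.startswith ('S' :: 'E' :: 'L' :: 'E' :: 'C' :: 'T' :: y) ['S','E','L','E','C','T'] = true := by
    have := pvStartswith_append_true ['S','E','L','E','C','T'] y
    simpa using this
  simp only [pvScan, pvTable, List.find?, hs, h0]
  simp [List.drop]

lemma pvScan_select (y : List Char) :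
    pvScan (['s','e','l','e','c','t'] ++ y) = ['s','e','l','\n','e','c','t'] ++ pvScan y := by
  have hT : ['s','e','l','e','c','t'] ++ y = 's' :: 'e' :: 'l' :: 'e' :: 'c' :: 't' :: y := by simp
  rw [hT]
  have h0 : PySem.Chars.startswith ('s' :: 'e' :: 'l' :: 'e' :: 'c' :: 't' :: y) ['s','c','r','i','p','t'] = false := by
    have := pvStartswith_append_false (k := ['s','c','r','i','p','t']) (b := ['s','e','l','e','c','t']) (by decide) (by decide) y
    simpa using this
  have h1 : PySem.Chars.startswith ('s' :: 'e' :: 'l' :: 'e' :: 'c' :: 't' :: y) ['S','E','L','E','C','T'] = false := by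
    have := pvStartswith_append_false (k := ['S','E','L','E','C','T']) (b := ['s','e','l','e','c','t']) (by decide) (by decide) y
    simpa using this
  have hs : PySem.Chars.startswith ('s' :: 'e' :: 'l' :: 'e' :: 'c' :: 't' :: y) ['s','e','l','e','c','t'] = true := by
    have := pvStartswith_append_true ['s','e','l','e','c','t'] y
    simpa using this
  simp only [pvScan, pvTable, List.find?, hs, h0, h1]
  simp [List.drop]

lemma pvScan_UNION (y : List Char) :
    pvScan (['U','N','I','O','N'] ++ y) = ['U','N','I','\n','O','N'] ++ pvScan y := by
  have hT : ['U','N','I','O','N'] ++ y = 'U' :: 'N' :: 'I' :: 'O' :: 'N' :: y := by simp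
  rw [hT]
  have h0 : PySem.Chars.startswith ('U' :: 'N' :: 'I' :: 'O' :: 'N' :: y) ['s','c','r','i','p','t'] = false := by
    have := pvStartswith_append_false (k := ['s','c','r','i','p','t']) (b := ['U','N','I','O','N']) (by decide) (by decide) y
    simpa using this
  have h1 : PySem.Chars.startswith ('U' :: 'N' :: 'I' :: 'O' :: 'N' :: y) ['S','E','L','E','C','T'] = false := by
    have := pvStartswith_append_false (k := ['S','E','L','E','C','T']) (b := ['U','N','I','O','N']) (by decide) (by decide) y
    simpa using this
  have h2 : PySem.Chars.startswith ('U' :: 'N' :: 'I' :: 'O' :: 'N' :: y) ['s','e','l','e','c','t'] = false := by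
    have := pvStartswith_append_false (k := ['s','e','l','e','c','t']) (b := ['U','N','I','O','N']) (by decide) (by decide) y
    simpa using this
  have hs : PySem.Chars.startswith ('U' :: 'N' :: 'I' :: 'O' :: 'N' :: y) ['U','N','I','O','N'] = true := by
    have := pvStartswith_append_true ['U','N','I','O','N'] y
    simpa using this
  simp only [pvScan, pvTable, List.find?, hs, h0, h1, h2]
  simp [List.drop]

lemma pvScan_union (y : List Char) :
    pvScan (['u','n','i','o','n'] ++ y) = ['u','n','i','\n','o','n'] ++ pvScan y := by
  have hT : ['u','n','i','o','n'] ++ y = 'u' :: 'n' :: 'i' :: 'o' :: 'n' :: y := by simp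
  rw [hT]
  have h0 : PySem.Chars.startswith ('u' :: 'n' :: 'i' :: 'o' :: 'n' :: y) ['s','c','r','i','p','t'] = false := by
    have := pvStartswith_append_false (k := ['s','c','r','i','p','t']) (b := ['u','n','i','o','n']) (by decide) (by decide) y
    simpa using this
  have h1 : PySem.Chars.startswith ('u' :: 'n' :: 'i' :: 'o' :: 'n' :: y) ['S','E','L','E','C','T'] = false := by
    have := pvStartswith_append_false (k := ['S','E','L','E','C','T']) (b := ['u','n','i','o','n']) (by decide) (by decide) y
    simpa using this
  have h2 : PySem.Chars.startswith ('u' :: 'n' :: 'i' :: 'o' :: 'n' :: y) ['s','e','l','e','c','t'] = false := by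
    have := pvStartswith_append_false (k := ['s','e','l','e','c','t']) (b := ['u','n','i','o','n']) (by decide) (by decide) y
    simpa using this
  have h3 : PySem.Chars.startswith ('u' :: 'n' :: 'i' :: 'o' :: 'n' :: y) ['U','N','I','O','N'] = false := by
    have := pvStartswith_append_false (k := ['U','N','I','O','N']) (b := ['u','n','i','o','n']) (by decide) (by decide) y
    simpa using this
  have hs : PySem.Chars.startswith ('u' :: 'n' :: 'i' :: 'o' :: 'n' :: y) ['u','n','i','o','n'] = true := by
    have := pvStartswith_append_true ['u','n','i','o','n'] y
    simpa using this
  simp only [pvScan, pvTable, List.find?, hs, h0, h1, h2, h3]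
  simp [List.drop]

lemma pvScan_alert (y : List Char) :
    pvScan (['a','l','e','r','t'] ++ y) = ['a','l','e','\n','r','t'] ++ pvScan y := by
  have hT : ['a','l','e','r','t'] ++ y = 'a' :: 'l' :: 'e' :: 'r' :: 't' :: y := by simp
  rw [hT]
  have h0 : PySem.Chars.startswith ('a' :: 'l' :: 'e' :: 'r' :: 't' :: y) ['s','c','r','i','p','t'] = false := by
    have := pvStartswith_append_false (k := ['s','c','r','i','p','t']) (b := ['a','l','e','r','t']) (by decide) (by decide) y
    simpa using this
  have h1 : PySem.Chars.startswith ('a' :: 'l' :: 'e' :: 'r' :: 't' :: y) ['S','E','L','E','C','T'] = false := by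
    have := pvStartswith_append_false (k := ['S','E','L','E','C','T']) (b := ['a','l','e','r','t']) (by decide) (by decide) y
    simpa using this
  have h2 : PySem.Chars.startswith ('a' :: 'l' :: 'e' :: 'r' :: 't' :: y) ['s','e','l','e','c','t'] = false := by
    have := pvStartswith_append_false (k := ['s','e','l','e','c','t']) (b := ['a','l','e','r','t']) (by decide) (by decide) y
    simpa using this
  have h3 : PySem.Chars.startswith ('a' :: 'l' :: 'e' :: 'r' :: 't' :: y) ['U','N','I','O','N'] = false := by
    have := pvStartswith_append_false (k := ['U','N','I','O','N']) (b := ['a','l','e','r','t']) (by decide) (by decide) y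
    simpa using this
  have h4 : PySem.Chars.startswith ('a' :: 'l' :: 'e' :: 'r' :: 't' :: y) ['u','n','i','o','n'] = false := by
    have := pvStartswith_append_false (k := ['u','n','i','o','n']) (b := ['a','l','e','r','t']) (by decide) (by decide) y
    simpa using this
  have hs : PySem.Chars.startswith ('a' :: 'l' :: 'e' :: 'r' :: 't' :: y) ['a','l','e','r','t'] = true := by
    have := pvStartswith_append_true ['a','l','e','r','t'] y
    simpa using this
  simp only [pvScan, pvTable, List.find?, hs, h0, h1, h2, h3, h4]
  simp [List.drop]


lemma pvMem_keywords {p : List Char × List Char} (hp : p ∈ pvTable) : p.1 ∈ pvKeywords := by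
  fin_cases hp <;> simp [pvKeywords]

lemma pvScan_cons_of_free {c : Char} {t : List Char} (hfree : pvKwFree (c :: t)) :
    pvScan (c :: t) = c :: pvScan t := by
  have hfind : pvTable.find? (fun p => PySem.Chars.startswith (c :: t) p.1) = none := by
    rw [List.find?_eq_none]
    intro p hp
    show ¬ PySem.Chars.startswith (c :: t) p.1 = true
    intro hc
    exact hfree p.1 (pvMem_keywords hp) ((PySem.Chars.startswith_iff _ _).mp hc)
  simp only [pvScan, hfind]

theorem chain_eq_scan (l : List Char) : pvChain l = pvScan l := by
  suffices h : ∀ N (l : List Char), l.length ≤ N → pvChain l = pvScan l from h l.length l le_rfl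
  intro N
  induction N with
  | zero =>
    intro l hl
    have : l = [] := List.length_eq_zero_iff.mp (Nat.le_zero.mp hl)
    subst this
    simp [pvChain, pvScan, pvRep]
  | succ N ih =>
    intro l hl
    by_cases h1 : ['s','c','r','i','p','t'] <+: l
    · obtain ⟨y, rfl⟩ := h1
      rw [pvChain_script, pvScan_script, ih y (by simp at hl ⊢; omega)]
    by_cases h2 : ['S','E','L','E','C','T'] <+: l
    · obtain ⟨y, rfl⟩ := h2
      rw [pvChain_SELECT, pvScan_SELECT, ih y (by simp at hl ⊢; omega)]
    by_cases h3 : ['s','e','l','e','c','t'] <+: l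
    · obtain ⟨y, rfl⟩ := h3
      rw [pvChain_select, pvScan_select, ih y (by simp at hl ⊢; omega)]
    by_cases h4 : ['U','N','I','O','N'] <+: l
    · obtain ⟨y, rfl⟩ := h4
      rw [pvChain_UNION, pvScan_UNION, ih y (by simp at hl ⊢; omega)]
    by_cases h5 : ['u','n','i','o','n'] <+: l
    · obtain ⟨y, rfl⟩ := h5
      rw [pvChain_union, pvScan_union, ih y (by simp at hl ⊢; omega)]
    by_cases h6 : ['a','l','e','r','t'] <+: l
    · obtain ⟨y, rfl⟩ := h6
      rw [pvChain_alert, pvScan_alert, ih y (by simp at hl ⊢; omega)]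
    cases l with
    | nil => simp [pvChain, pvScan, pvRep]
    | cons c t =>
      have hfree : pvKwFree (c :: t) := by
        intro k hk
        fin_cases hk <;> assumption
      rw [pvChain_cons hfree, pvScan_cons_of_free hfree, ih t (by simp at hl; omega)]

lemma pvStr_replace_ofList (x : List Char) (o n : String) (ho : o.toList ≠ []) :
    PySem.Str.replace (String.ofList x) o n = String.ofList (pvRep o.toList n.toList x) := by
  show String.ofList (PySem.Chars.replace (String.ofList x).toList o.toList n.toList) = _
  rw [String.toList_ofList, pvReplace_eq_pvRep _ _ _ ho]

lemma pvPortA_eq (x : List Char) :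
    newline_injection_py (String.ofList x) = String.ofList (pvChain x) := by
  simp only [newline_injection_py, List.foldl]
  rw [pvStr_replace_ofList (o := "script") (n := "scr\nipt") (ho := by decide),
    pvStr_replace_ofList (o := PySem.Str.lower "script") (n := PySem.Str.lower "scr\nipt") (ho := by decide),
    pvStr_replace_ofList (o := "SELECT") (n := "SEL\nECT") (ho := by decide),
    pvStr_replace_ofList (o := PySem.Str.lower "SELECT") (n := PySem.Str.lower "SEL\nECT") (ho := by decide),
    pvStr_replace_ofList (o := "UNION") (n := "UNI\nON") (ho := by decide),
    pvStr_replace_ofList (o := PySem.Str.lower "UNION") (n := PySem.Str.lower "UNI\nON") (ho := by decide),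
    pvStr_replace_ofList (o := "alert") (n := "ale\nrt") (ho := by decide),
    pvStr_replace_ofList (o := PySem.Str.lower "alert") (n := PySem.Str.lower "ale\nrt") (ho := by decide)]
  rfl

theorem newline_injection_py_spec : Claim_equal_newline_injection_py := by
  intro payload _
  unfold Spec_newline_injection_py
  have hA : newline_injection_py payload = String.ofList (pvChain payload.toList) := by
    rw [← pvPortA_eq payload.toList, String.ofList_toList]
  rw [hA, chain_eq_scan]
  rfl
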